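-- pv_equiv track=rewrite | github.com/tdufva/arted_intelligence | scripts/build_dataset.py | fallback_location_frames
-- ===== SOURCE A (Python) =====
-- def unique_ids(values: list[str], maximum: int = 3) -> list[str]:
--     output: list[str] = []
--     for value in values:
--         if value and value not in output:
--             output.append(value)
--         if len(output) == maximum:
--             break
--     return output
--
-- def fallback_location_frames(type_ids: list[str], perspective_ids: list[str], signal_ids: list[str]) -> list[str]:
--     guesses = []
--     if "cognitive" in type_ids:
--         guesses.append("mind_concepts")
--     if "perceptual" in type_ids:
--         guesses.append("vision_perception")
--     if "affective" in type_ids: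
--         guesses.append("body_affect")
--     if "creative" in type_ids or "materiality" in signal_ids:
--         guesses.append("artworks_materials")
--     if "social" in type_ids or any(value in perspective_ids for value in ["critical", "community"]):
--         guesses.append("relations_culture")
--     if any(value in perspective_ids for value in ["pedagogy", "developmental"]):
--         guesses.append("pedagogical_institutions")
--     if "digital" in type_ids or "technology" in perspective_ids or "technology" in signal_ids:
--         guesses.append("media_machines")
--     if "place" in signal_ids:
--         guesses.append("place_ecology")
--     return unique_ids(guesses)
-- ===== SOURCE B (Python) =====
-- FRAME_ORDER = [
--     "mind_concepts", "vision_perception", "body_affect", "artworks_materials",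
--     "relations_culture", "pedagogical_institutions", "media_machines", "place_ecology",
-- ]
-- TYPE_TRIGGERS = {
--     "cognitive": "mind_concepts", "perceptual": "vision_perception",
--     "affective": "body_affect", "creative": "artworks_materials",
--     "social": "relations_culture", "digital": "media_machines",
-- }
-- PERSPECTIVE_TRIGGERS = {
--     "critical": "relations_culture", "community": "relations_culture",
--     "pedagogy": "pedagogical_institutions", "developmental": "pedagogical_institutions",
--     "technology": "media_machines",
-- }
-- SIGNAL_TRIGGERS = {
--     "materiality": "artworks_materials", "technology": "media_machines",
--     "place": "place_ecology",
-- }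
--
-- def fallback_location_frames(type_ids: list[str], perspective_ids: list[str], signal_ids: list[str]) -> list[str]:
--     fired: set[str] = set()
--     for ids, triggers in ((type_ids, TYPE_TRIGGERS), (perspective_ids, PERSPECTIVE_TRIGGERS), (signal_ids, SIGNAL_TRIGGERS)):
--         for token in ids:
--             frame = triggers.get(token)
--             if frame is not None:
--                 fired.add(frame)
--     return [frame for frame in FRAME_ORDER if frame in fired][:3]
-- ===== Notes on version B (the rewrite author's own statement) =====
-- stated objective: alternative
-- what changed: Replaces A's eight hard-coded membership-test branches plus the unique_ids dedup/cap pass by an inverted index: three token-to-frame dictionaries are looked up once per input token to build a fired set in a single pass, and the result is the canonical frame order filtered by that set and truncated to three.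
import Mathlib
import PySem

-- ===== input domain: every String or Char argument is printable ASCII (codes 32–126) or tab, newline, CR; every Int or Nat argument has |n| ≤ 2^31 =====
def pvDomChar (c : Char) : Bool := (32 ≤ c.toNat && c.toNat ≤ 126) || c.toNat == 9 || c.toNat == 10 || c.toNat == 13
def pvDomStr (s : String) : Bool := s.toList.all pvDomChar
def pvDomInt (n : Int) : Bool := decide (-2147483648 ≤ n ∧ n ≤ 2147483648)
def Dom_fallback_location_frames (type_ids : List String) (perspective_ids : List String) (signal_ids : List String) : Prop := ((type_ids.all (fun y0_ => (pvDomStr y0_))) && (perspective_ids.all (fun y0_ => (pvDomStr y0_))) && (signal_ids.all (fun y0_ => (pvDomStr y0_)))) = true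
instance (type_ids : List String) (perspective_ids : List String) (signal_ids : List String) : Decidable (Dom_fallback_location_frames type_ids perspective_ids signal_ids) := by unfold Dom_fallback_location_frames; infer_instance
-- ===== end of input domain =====

-- B replaces A's eight if-branches + unique_ids dedup/cap pass with an inverted index:
-- token→frame dictionaries looked up once per input token build a fired set, and the
-- canonical frame order is filtered by that set and truncated to three (alternative decomposition).

-- ===== PORT A =====
-- the for-loop of unique_ids: appends non-empty unseen values, breaks at `maximum`
def uniqueLoop (values : List String) (output : List String) (maximum : Int) : List String :=
  match values with
  | [] => output
  | value :: rest =>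
    let output' := if value ≠ "" && !(output.contains value) then output ++ [value] else output
    if (output'.length : Int) = maximum then output' else uniqueLoop rest output' maximum

def unique_ids (values : List String) (maximum : Int) : List String :=
  uniqueLoop values [] maximum

def fallback_location_frames (type_ids : List String) (perspective_ids : List String) (signal_ids : List String) : List String :=
  let guesses : List String := []
  let guesses := if type_ids.contains "cognitive" then guesses ++ ["mind_concepts"] else guesses
  let guesses := if type_ids.contains "perceptual" then guesses ++ ["vision_perception"] else guesses
  let guesses := if type_ids.contains "affective" then guesses ++ ["body_affect"] else guesses
  let guesses := if type_ids.contains "creative" || signal_ids.contains "materiality" then guesses ++ ["artworks_materials"] else guesses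
  let guesses := if type_ids.contains "social" || (["critical", "community"].any (fun value => perspective_ids.contains value)) then guesses ++ ["relations_culture"] else guesses
  let guesses := if (["pedagogy", "developmental"].any (fun value => perspective_ids.contains value)) then guesses ++ ["pedagogical_institutions"] else guesses
  let guesses := if type_ids.contains "digital" || (perspective_ids.contains "technology" || signal_ids.contains "technology") then guesses ++ ["media_machines"] else guesses
  let guesses := if signal_ids.contains "place" then guesses ++ ["place_ecology"] else guesses
  unique_ids guesses 3

-- ===== PORT B =====
def frameOrder : List String :=
  ["mind_concepts", "vision_perception", "body_affect", "artworks_materials",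
   "relations_culture", "pedagogical_institutions", "media_machines", "place_ecology"]

def typeTriggers : PySem.Dict String String := PySem.Dict.ofList
  [("cognitive", "mind_concepts"), ("perceptual", "vision_perception"),
   ("affective", "body_affect"), ("creative", "artworks_materials"),
   ("social", "relations_culture"), ("digital", "media_machines")]

def perspectiveTriggers : PySem.Dict String String := PySem.Dict.ofList
  [("critical", "relations_culture"), ("community", "relations_culture"),
   ("pedagogy", "pedagogical_institutions"), ("developmental", "pedagogical_institutions"),
   ("technology", "media_machines")]

def signalTriggers : PySem.Dict String String := PySem.Dict.ofList
  [("materiality", "artworks_materials"), ("technology", "media_machines"),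
   ("place", "place_ecology")]

-- the inner 'for token in ids' loop: look the token up, add the frame to the fired set
def fireFold (triggers : PySem.Dict String String) (ids : List String) (fired : PySem.Set String) : PySem.Set String :=
  ids.foldl (fun fired token =>
    match triggers.get? token with
    | some frame => PySem.Set.add fired frame
    | none => fired) fired

def fallback_location_frames_alt (type_ids : List String) (perspective_ids : List String) (signal_ids : List String) : List String :=
  let fired := fireFold signalTriggers signal_ids
    (fireFold perspectiveTriggers perspective_ids
      (fireFold typeTriggers type_ids PySem.Set.empty))
  (frameOrder.filter (fun frame => PySem.Set.contains fired frame)).take 3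

-- ===== PRECONDITION & SPEC =====
def Spec_fallback_location_frames (type_ids : List String) (perspective_ids : List String) (signal_ids : List String) (out : List String) : Prop := out = fallback_location_frames_alt type_ids perspective_ids signal_ids
instance (type_ids : List String) (perspective_ids : List String) (signal_ids : List String) (out : List String) : Decidable (Spec_fallback_location_frames type_ids perspective_ids signal_ids out) := by unfold Spec_fallback_location_frames; infer_instance

-- ===== CLAIM (what is proved, stated in full; the proofs are below) =====
def Claim_equal_fallback_location_frames : Prop := ∀ (type_ids : List String) (perspective_ids : List String) (signal_ids : List String), Dom_fallback_location_frames type_ids perspective_ids signal_ids → Spec_fallback_location_frames type_ids perspective_ids signal_ids (fallback_location_frames type_ids perspective_ids signal_ids)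

-- ===== LEMMAS AND PROOFS =====

-- membership in the fired set after one dictionary pass
theorem mem_fireFold (m : PySem.Dict String String) (ids : List String)
    (fired : PySem.Set String) (f : String) :
    f ∈ fireFold m ids fired ↔ f ∈ fired ∨ ∃ x ∈ ids, m.get? x = some f := by
  induction ids generalizing fired with
  | nil => simp [fireFold]
  | cons a l ih =>
    simp only [fireFold, List.foldl_cons] at *
    cases h : m.get? a with
    | none => rw [ih]; simp [h]
    | some fr =>
      rw [ih, List.exists_mem_cons_iff, h]
      simp only [PySem.Set.mem_add, Option.some_inj]
      tauto

-- closed forms of the three trigger dictionaries' lookups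
theorem get_typeTriggers (x : String) : typeTriggers.get? x =
    if "cognitive" = x then some "mind_concepts" else if "perceptual" = x then some "vision_perception"
    else if "affective" = x then some "body_affect" else if "creative" = x then some "artworks_materials"
    else if "social" = x then some "relations_culture" else if "digital" = x then some "media_machines"
    else none := by
  have h : typeTriggers = PySem.Dict.mk
    [("cognitive", "mind_concepts"), ("perceptual", "vision_perception"),
     ("affective", "body_affect"), ("creative", "artworks_materials"),
     ("social", "relations_culture"), ("digital", "media_machines")] := by decide
  rw [h]; simp only [PySem.Dict.get?_mk_cons, beq_iff_eq]; rfl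

theorem get_perspectiveTriggers (x : String) : perspectiveTriggers.get? x =
    if "critical" = x then some "relations_culture" else if "community" = x then some "relations_culture"
    else if "pedagogy" = x then some "pedagogical_institutions"
    else if "developmental" = x then some "pedagogical_institutions"
    else if "technology" = x then some "media_machines" else none := by
  have h : perspectiveTriggers = PySem.Dict.mk
    [("critical", "relations_culture"), ("community", "relations_culture"),
     ("pedagogy", "pedagogical_institutions"), ("developmental", "pedagogical_institutions"),
     ("technology", "media_machines")] := by decide
  rw [h]; simp only [PySem.Dict.get?_mk_cons, beq_iff_eq]; rfl

theorem get_signalTriggers (x : String) : signalTriggers.get? x =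
    if "materiality" = x then some "artworks_materials" else if "technology" = x then some "media_machines"
    else if "place" = x then some "place_ecology" else none := by
  have h : signalTriggers = PySem.Dict.mk
    [("materiality", "artworks_materials"), ("technology", "media_machines"),
     ("place", "place_ecology")] := by decide
  rw [h]; simp only [PySem.Dict.get?_mk_cons, beq_iff_eq]; rfl

-- the fired set's membership test, frame by frame, as A's branch conditions
theorem contains_fired (t p s : List String) (f : String) :
    PySem.Set.contains (fireFold signalTriggers s
      (fireFold perspectiveTriggers p (fireFold typeTriggers t PySem.Set.empty))) f = true ↔
    (∃ x ∈ t, typeTriggers.get? x = some f) ∨ (∃ x ∈ p, perspectiveTriggers.get? x = some f) ∨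
    (∃ x ∈ s, signalTriggers.get? x = some f) := by
  rw [PySem.Set.contains_iff, mem_fireFold, mem_fireFold, mem_fireFold]
  simp [PySem.Set.empty, or_assoc]

theorem fired_mind (t p s : List String) :
    PySem.Set.contains (fireFold signalTriggers s
      (fireFold perspectiveTriggers p (fireFold typeTriggers t PySem.Set.empty))) "mind_concepts"
    = t.contains "cognitive" := by
  rw [Bool.eq_iff_iff, contains_fired]
  simp [get_typeTriggers, get_perspectiveTriggers, get_signalTriggers, ite_eq_iff]

theorem fired_vision (t p s : List String) :
    PySem.Set.contains (fireFold signalTriggers s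
      (fireFold perspectiveTriggers p (fireFold typeTriggers t PySem.Set.empty))) "vision_perception"
    = t.contains "perceptual" := by
  rw [Bool.eq_iff_iff, contains_fired]
  simp [get_typeTriggers, get_perspectiveTriggers, get_signalTriggers, ite_eq_iff]

theorem fired_body (t p s : List String) :
    PySem.Set.contains (fireFold signalTriggers s
      (fireFold perspectiveTriggers p (fireFold typeTriggers t PySem.Set.empty))) "body_affect"
    = t.contains "affective" := by
  rw [Bool.eq_iff_iff, contains_fired]
  simp [get_typeTriggers, get_perspectiveTriggers, get_signalTriggers, ite_eq_iff]

theorem fired_artworks (t p s : List String) :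
    PySem.Set.contains (fireFold signalTriggers s
      (fireFold perspectiveTriggers p (fireFold typeTriggers t PySem.Set.empty))) "artworks_materials"
    = (t.contains "creative" || s.contains "materiality") := by
  rw [Bool.eq_iff_iff, contains_fired]
  simp [get_typeTriggers, get_perspectiveTriggers, get_signalTriggers, ite_eq_iff]

theorem fired_relations (t p s : List String) :
    PySem.Set.contains (fireFold signalTriggers s
      (fireFold perspectiveTriggers p (fireFold typeTriggers t PySem.Set.empty))) "relations_culture"
    = (t.contains "social" || (p.contains "critical" || p.contains "community")) := by
  rw [Bool.eq_iff_iff, contains_fired]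
  simp [get_typeTriggers, get_perspectiveTriggers, get_signalTriggers, ite_eq_iff]
  constructor
  · rintro (h | ⟨x, hx, h⟩)
    · exact Or.inl h
    · by_cases hc : "critical" = x
      · subst hc; exact Or.inr (Or.inl hx)
      · rw [← h hc] at hx; exact Or.inr (Or.inr hx)
  · rintro (h | h | h)
    · exact Or.inl h
    · exact Or.inr ⟨"critical", h, fun hc => absurd rfl hc⟩
    · exact Or.inr ⟨"community", h, fun _ => rfl⟩

theorem fired_pedagogical (t p s : List String) :
    PySem.Set.contains (fireFold signalTriggers s
      (fireFold perspectiveTriggers p (fireFold typeTriggers t PySem.Set.empty))) "pedagogical_institutions"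
    = (p.contains "pedagogy" || p.contains "developmental") := by
  rw [Bool.eq_iff_iff, contains_fired]
  simp [get_typeTriggers, get_perspectiveTriggers, get_signalTriggers, ite_eq_iff]
  constructor
  · rintro ⟨x, hx, -, -, h⟩
    by_cases hp : "pedagogy" = x
    · subst hp; exact Or.inl hx
    · rw [← h hp] at hx; exact Or.inr hx
  · rintro (h | h)
    · exact ⟨"pedagogy", h, by decide, by decide, fun hp => absurd rfl hp⟩
    · exact ⟨"developmental", h, by decide, by decide, fun _ => rfl⟩

theorem fired_media (t p s : List String) :
    PySem.Set.contains (fireFold signalTriggers s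
      (fireFold perspectiveTriggers p (fireFold typeTriggers t PySem.Set.empty))) "media_machines"
    = (t.contains "digital" || (p.contains "technology" || s.contains "technology")) := by
  rw [Bool.eq_iff_iff, contains_fired]
  simp [get_typeTriggers, get_perspectiveTriggers, get_signalTriggers, ite_eq_iff]

theorem fired_place (t p s : List String) :
    PySem.Set.contains (fireFold signalTriggers s
      (fireFold perspectiveTriggers p (fireFold typeTriggers t PySem.Set.empty))) "place_ecology"
    = s.contains "place" := by
  rw [Bool.eq_iff_iff, contains_fired]
  simp [get_typeTriggers, get_perspectiveTriggers, get_signalTriggers, ite_eq_iff]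

-- with the eight conditions abstracted to Booleans, the equality is a finite (2^8) kernel check
theorem key (b1 b2 b3 b4 b5 b6 b7 b8 : Bool) :
    (let g : List String := []
     let g := if b1 then g ++ ["mind_concepts"] else g
     let g := if b2 then g ++ ["vision_perception"] else g
     let g := if b3 then g ++ ["body_affect"] else g
     let g := if b4 then g ++ ["artworks_materials"] else g
     let g := if b5 then g ++ ["relations_culture"] else g
     let g := if b6 then g ++ ["pedagogical_institutions"] else g
     let g := if b7 then g ++ ["media_machines"] else g
     let g := if b8 then g ++ ["place_ecology"] else g
     unique_ids g 3) =
    (let l8 : List String := if b8 = true then ["place_ecology"] else []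
     let l7 := if b7 = true then "media_machines" :: l8 else l8
     let l6 := if b6 = true then "pedagogical_institutions" :: l7 else l7
     let l5 := if b5 = true then "relations_culture" :: l6 else l6
     let l4 := if b4 = true then "artworks_materials" :: l5 else l5
     let l3 := if b3 = true then "body_affect" :: l4 else l4
     let l2 := if b2 = true then "vision_perception" :: l3 else l3
     let l1 := if b1 = true then "mind_concepts" :: l2 else l2
     l1.take 3) := by
  revert b1 b2 b3 b4 b5 b6 b7 b8
  decide

-- ===== VERDICT (by name: the statement is the Claim_ definition above) =====
theorem fallback_location_frames_spec : Claim_equal_fallback_location_frames := by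
  intro t p s _
  unfold Spec_fallback_location_frames fallback_location_frames fallback_location_frames_alt
  simp only [List.any_cons, List.any_nil, Bool.or_false, frameOrder,
    List.filter_cons, List.filter_nil,
    fired_mind, fired_vision, fired_body, fired_artworks, fired_relations,
    fired_pedagogical, fired_media, fired_place]
  exact key (t.contains "cognitive") (t.contains "perceptual") (t.contains "affective")
    (t.contains "creative" || s.contains "materiality")
    (t.contains "social" || (p.contains "critical" || p.contains "community"))
    (p.contains "pedagogy" || p.contains "developmental")
    (t.contains "digital" || (p.contains "technology" || s.contains "technology"))
    (s.contains "place")
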